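-- pv_equiv track=rewrite | github.com/DmytriiSas/SasSpMoPr | 4laby.py | generate_ascii_art
-- ===== SOURCE A (Python) =====
-- def align_text(ascii_art, width, align):
--     # Завдання 5: Вирівнювання тексту
--     aligned_art = []
--     for line in ascii_art:
--         if align == "центр":
--             aligned_art.append(line.center(width))
--         elif align == "право":
--             aligned_art.append(line.rjust(width))
--         else:
--             aligned_art.append(line.ljust(width))
--     return aligned_art
--
-- def generate_ascii_art(user_text, width, height, symbols, align="ліво"):
--     # Завдання 4: Функція генерації Art-у
--     ascii_art = []
--     symbol_count = len(symbols)
--     for y in range(height):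
--         line = []
--         for x in range(width):
--             char_index = (x + y) % len(user_text) % symbol_count
--             line.append(symbols[char_index])
--         ascii_art.append("".join(line))
--     return align_text(ascii_art, width, align)
-- ===== SOURCE B (Python) =====
-- def align_text(ascii_art, width, align):
--     aligned_art = []
--     for line in ascii_art:
--         if align == "центр":
--             aligned_art.append(line.center(width))
--         elif align == "право":
--             aligned_art.append(line.rjust(width))
--         else:
--             aligned_art.append(line.ljust(width))
--     return aligned_art
--
-- def generate_ascii_art(user_text, width, height, symbols, align="ліво"):
--     # cell (x, y) depends only on x + y: build one diagonal table, window it per row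
--     if width > 0 and height > 0:
--         text_len = len(user_text)
--         symbol_count = len(symbols)
--         seq = [symbols[k % text_len % symbol_count] for k in range(width + height - 1)]
--         rows = ["".join(seq[y:y + width]) for y in range(height)]
--     else:
--         rows = ["" for _ in range(height)]
--     return align_text(rows, width, align)
-- ===== Notes on version B (the rewrite author's own statement) =====
-- stated objective: alternative
-- what changed: Since cell (x,y) depends only on x+y, B precomputes one diagonal table seq of length width+height-1 and builds each row by joining the window seq[y:y+width], replacing A's nested per-cell modular-index loop.
import Mathlib
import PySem

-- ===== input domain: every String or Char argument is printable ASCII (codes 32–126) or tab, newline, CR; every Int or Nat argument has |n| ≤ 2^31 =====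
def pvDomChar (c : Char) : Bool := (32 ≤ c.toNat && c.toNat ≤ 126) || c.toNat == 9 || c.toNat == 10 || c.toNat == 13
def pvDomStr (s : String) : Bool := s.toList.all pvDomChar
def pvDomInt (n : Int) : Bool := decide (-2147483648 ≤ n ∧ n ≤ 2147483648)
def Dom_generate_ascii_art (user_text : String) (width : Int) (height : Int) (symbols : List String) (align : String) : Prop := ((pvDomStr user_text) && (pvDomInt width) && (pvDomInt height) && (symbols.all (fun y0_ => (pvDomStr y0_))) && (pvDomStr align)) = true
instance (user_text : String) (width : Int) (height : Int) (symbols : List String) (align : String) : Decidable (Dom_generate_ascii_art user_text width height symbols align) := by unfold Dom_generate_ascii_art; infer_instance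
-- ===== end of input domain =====

-- B replaces A's nested per-cell modular loop by one precomputed diagonal table
-- (cell (x,y) depends only on x+y) windowed per row; objective: alternative decomposition.


-- ===== PORT A =====
-- Python's str.ljust / str.rjust / str.center, exact (CPython pads with spaces;
-- center's extra space placement follows CPython: left = marg//2 + (marg & width & 1)).
def pyLjust (s : String) (w : Int) : String :=
  let cs := s.toList
  if w ≤ (cs.length : Int) then s
  else String.ofList (cs ++ List.replicate (w - cs.length).toNat ' ')

def pyRjust (s : String) (w : Int) : String :=
  let cs := s.toList
  if w ≤ (cs.length : Int) then s
  else String.ofList (List.replicate (w - cs.length).toNat ' ' ++ cs)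

def pyCenter (s : String) (w : Int) : String :=
  let cs := s.toList
  if w ≤ (cs.length : Int) then s
  else
    let marg := (w - cs.length).toNat
    let left := marg / 2 + (marg &&& w.toNat &&& 1)
    String.ofList (List.replicate left ' ' ++ cs ++ List.replicate (marg - left) ' ')

-- helper align_text, shared by the Python module (used unchanged by both A and B)
def align_text (ascii_art : List String) (width : Int) (align : String) : List String :=
  ascii_art.foldl (fun acc line =>
    acc ++ [if align == "центр" then pyCenter line width
            else if align == "право" then pyRjust line width
            else pyLjust line width]) []

def generate_ascii_art (user_text : String) (width : Int) (height : Int) (symbols : List String) (align : String) : List String :=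
  let symbol_count : Int := symbols.length
  let ascii_art := (PySem.List.pyRange 0 height 1).foldl (fun art y =>
    let line := (PySem.List.pyRange 0 width 1).foldl (fun l x =>
      l ++ [PySem.List.pyGetD symbols
              (PySem.Int.mod (PySem.Int.mod (x + y) (PySem.Str.len user_text)) symbol_count) ""]) []
    art ++ [PySem.Str.join "" line]) []
  align_text ascii_art width align

-- ===== PORT B =====
def generate_ascii_art_alt (user_text : String) (width : Int) (height : Int) (symbols : List String) (align : String) : List String :=
  let rows :=
    if 0 < width ∧ 0 < height then
      let text_len : Int := PySem.Str.len user_text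
      let symbol_count : Int := symbols.length
      let seq := (PySem.List.pyRange 0 (width + height - 1) 1).map (fun k =>
        PySem.List.pyGetD symbols (PySem.Int.mod (PySem.Int.mod k text_len) symbol_count) "")
      (PySem.List.pyRange 0 height 1).map (fun y =>
        PySem.Str.join "" (PySem.List.slice seq (some y) (some (y + width))))
    else
      (PySem.List.pyRange 0 height 1).map (fun _ => "")
  align_text rows width align

-- ===== PRECONDITION & SPEC =====
-- Pre_ excludes exactly the inputs where A raises ZeroDivisionError: width > 0 and
-- height > 0 with empty user_text or empty symbols (B raises there too).
def Pre_generate_ascii_art (user_text : String) (width : Int) (height : Int) (symbols : List String) (align : String) : Prop :=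
  0 < width → 0 < height → (user_text ≠ "" ∧ symbols ≠ [])

instance (user_text : String) (width : Int) (height : Int) (symbols : List String) (align : String) : Decidable (Pre_generate_ascii_art user_text width height symbols align) := by
  unfold Pre_generate_ascii_art; infer_instance

def pvWitness_generate_ascii_art : String × Int × Int × List String × String := ("ab", 3, 2, ["*", "#"], "x")

def Spec_generate_ascii_art (user_text : String) (width : Int) (height : Int) (symbols : List String) (align : String) (out : List String) : Prop := out = generate_ascii_art_alt user_text width height symbols align
instance (user_text : String) (width : Int) (height : Int) (symbols : List String) (align : String) (out : List String) : Decidable (Spec_generate_ascii_art user_text width height symbols align out) := by unfold Spec_generate_ascii_art; infer_instance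

-- ===== CLAIM (what is proved, stated in full; the proofs are below) =====
def Claim_equal_generate_ascii_art : Prop := ∀ (user_text : String) (width : Int) (height : Int) (symbols : List String) (align : String), Dom_generate_ascii_art user_text width height symbols align → Pre_generate_ascii_art user_text width height symbols align → Spec_generate_ascii_art user_text width height symbols align (generate_ascii_art user_text width height symbols align)

-- ===== LEMMAS AND PROOFS =====

-- the window seq[y:y+width] of the diagonal table is exactly row y's per-cell list
lemma slice_table_eq_row (f : Int → String) (w h y : Nat) (hw : 0 < w) (hy : y < h) :
    PySem.List.slice (((PySem.List.pyRange 0 ((w : Int) + (h : Int) - 1) 1)).map f)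
      (some (y : Int)) (some ((y : Int) + (w : Int)))
      = (PySem.List.pyRange 0 (w : Int) 1).map (fun x => f (x + (y : Int))) := by
  have hN : ((w : Int) + (h : Int) - 1) = ((w + h - 1 : Nat) : Int) := by push_cast [Nat.cast_sub (by omega : 1 ≤ w + h)]; ring
  rw [hN, PySem.List.pyRange_one, PySem.List.pyRange_one]
  have h1 : (((w + h - 1 : Nat) : Int) - 0).toNat = w + h - 1 := by omega
  have h2 : (((w : Nat) : Int) - 0).toNat = w := by omega
  rw [h1, h2]
  have hcast : ((y : Int) + (w : Int)) = (y : Int) + ((w : Nat) : Int) := by norm_num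
  rw [hcast, PySem.List.slice_natCast_add]
  apply List.ext_getElem
  · simp [List.length_take, List.length_drop]; omega
  · intro i hi _
    simp only [List.getElem_take, List.getElem_drop, List.getElem_map, List.getElem_range]
    congr 1
    have : i < w := by simp [List.length_take, List.length_drop] at hi; omega
    push_cast
    ring

lemma join_empty_line : PySem.Str.join "" ([] : List String) = "" := by decide

-- ===== VERDICT (by name: the statement is the Claim_ definition above) =====
theorem generate_ascii_art_spec : Claim_equal_generate_ascii_art := by
  intro user_text width height symbols align _ _
  unfold Spec_generate_ascii_art generate_ascii_art generate_ascii_art_alt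
  simp only [PySem.List.foldl_append_singleton_eq_map, List.nil_append]
  congr 1
  by_cases hwh : 0 < width ∧ 0 < height
  · rw [if_pos hwh]
    obtain ⟨hw, hh⟩ := hwh
    apply List.map_congr_left
    intro y hy
    rw [PySem.List.mem_pyRange_one] at hy
    congr 1
    have hyn : y = ((y.toNat : Nat) : Int) := by omega
    have hwn : width = ((width.toNat : Nat) : Int) := by omega
    have hhn : height = ((height.toNat : Nat) : Int) := by omega
    rw [hyn, hwn, hhn,
        slice_table_eq_row _ width.toNat height.toNat y.toNat (by omega) (by omega)]
  · rw [if_neg hwh]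
    by_cases hh : height ≤ 0
    · rw [PySem.List.pyRange_one_eq_nil (a := (0:Int)) (b := height) hh]
      simp
    · have hw : width ≤ 0 := by omega
      rw [PySem.List.pyRange_one_eq_nil (a := (0:Int)) (b := width) hw]
      simp [join_empty_line]
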